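-- pv_equiv track=rewrite | github.com/raghunandan68/Full-Stack-Data-Scientist | 08-09-2025/conditional_capitalize.py | preLetterCase
-- ===== SOURCE A (Python) =====
-- def preLetterCase(s,l):
--     s=s.lower()
--     k=list(s)
--     try:
--         index=k.index(l)
--         for i in range(0,index):
--             k[i]=k[i].lower()
--         for j in range(index,len(k)):
--             k[j]=k[j].upper()
--     except:
--         return s.lower()
--     return ''.join(k)
-- ===== SOURCE B (Python) =====
-- def preLetterCase(s, l):
--     out = []
--     seen = False
--     for c in s.lower():
--         seen = seen or c == l
--         out.append(c.upper() if seen else c)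
--     return ''.join(out)
-- ===== Notes on version B (the rewrite author's own statement) =====
-- stated objective: alternative
-- what changed: A one-pass state machine: a boolean 'seen' flag flips at the first character equal to l and each character is emitted upper- or as-is depending on the flag, replacing A's list copy, list.index inside try/except and the two per-index mutation loops.
import Mathlib
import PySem

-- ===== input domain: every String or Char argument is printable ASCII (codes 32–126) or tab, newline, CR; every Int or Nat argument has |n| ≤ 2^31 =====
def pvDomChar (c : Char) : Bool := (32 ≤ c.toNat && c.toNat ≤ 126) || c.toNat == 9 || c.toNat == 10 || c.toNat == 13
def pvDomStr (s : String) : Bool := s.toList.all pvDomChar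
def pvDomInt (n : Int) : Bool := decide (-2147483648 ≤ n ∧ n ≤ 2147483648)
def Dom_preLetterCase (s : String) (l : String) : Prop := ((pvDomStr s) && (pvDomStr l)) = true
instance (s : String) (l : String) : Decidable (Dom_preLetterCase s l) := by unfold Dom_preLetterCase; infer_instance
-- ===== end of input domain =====

-- B replaces A's list copy, try/except around list.index and the two per-index mutation loops by a
-- single left-to-right pass carrying a boolean 'seen' flag that flips at the first character equal
-- to l (objective: alternative decomposition, same cost).

-- ===== PORT A =====
-- for i in range(0, index): k[i] = k[i].lower()
def pvLowerLoop (k : List Char) (index : Nat) : List Char :=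
  (PySem.List.pyRange 0 (index : Int) 1).foldl
    (fun acc i => PySem.List.pySetD acc i (PySem.Chars.lowerChar (PySem.List.pyGetD acc i ' '))) k

-- for j in range(index, len(k)): k[j] = k[j].upper()
def pvUpperLoop (k : List Char) (index : Nat) : List Char :=
  (PySem.List.pyRange (index : Int) (k.length : Int) 1).foldl
    (fun acc j => PySem.List.pySetD acc j (PySem.Chars.upperChar (PySem.List.pyGetD acc j ' '))) k

def preLetterCase (s : String) (l : String) : String :=
  let s1 := PySem.Str.lower s                 -- s = s.lower()
  let k := s1.toList                          -- k = list(s): 1-char strings, modelled as chars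
  -- index = k.index(l): the String l equals a 1-char string element iff l is exactly that
  -- character; otherwise list.index raises ValueError (none here, caught by the bare except)
  let idx? : Option Nat :=
    match l.toList with
    | [c] => PySem.List.index? k c
    | _ => none
  match idx? with
  | none => PySem.Str.lower s1                -- except: return s.lower()
  | some index => String.ofList (pvUpperLoop (pvLowerLoop k index) index)   -- ''.join(k)

-- ===== PORT B =====
-- out = []; seen = False; for c in s.lower(): seen = seen or c == l; out.append(c.upper() if seen else c)
def pvAltGo (l : String) : List Char → Bool → List Char
  | [], _ => []
  | c :: rest, seen =>
      let seen' := seen || decide (String.ofList [c] = l)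
      (if seen' then PySem.Chars.upperChar c else c) :: pvAltGo l rest seen'

def preLetterCase_alt (s : String) (l : String) : String :=
  String.ofList (pvAltGo l (PySem.Str.lower s).toList false)

-- ===== PRECONDITION & SPEC =====
def Spec_preLetterCase (s : String) (l : String) (out : String) : Prop := out = preLetterCase_alt s l
instance (s : String) (l : String) (out : String) : Decidable (Spec_preLetterCase s l out) := by unfold Spec_preLetterCase; infer_instance

-- ===== CLAIM (what is proved, stated in full; the proofs are below) =====
def Claim_equal_preLetterCase : Prop := ∀ (s : String) (l : String), Dom_preLetterCase s l → Spec_preLetterCase s l (preLetterCase s l)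

-- ===== LEMMAS AND PROOFS =====

theorem pvIsupper_iff (x : Char) : PySem.Chars.isupper x = true ↔ 65 ≤ x.toNat ∧ x.toNat ≤ 90 := by
  simp only [PySem.Chars.isupper, Bool.and_eq_true, decide_eq_true_eq, Char.le_def,
    UInt32.le_iff_toNat_le, Char.toNat]
  exact Iff.rfl

theorem pvLowerChar_idem (c : Char) :
    PySem.Chars.lowerChar (PySem.Chars.lowerChar c) = PySem.Chars.lowerChar c := by
  unfold PySem.Chars.lowerChar
  by_cases h : PySem.Chars.isupper c = true
  · rw [if_pos h]
    have hc := (pvIsupper_iff c).mp h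
    have hv : Nat.isValidChar (c.toNat + 32) := Or.inl (by omega)
    rw [if_neg]
    intro hup
    have h2 := (pvIsupper_iff _).mp hup
    rw [Char.toNat_ofNat, if_pos hv] at h2
    omega
  · rw [if_neg h, if_neg h]

theorem pvLower_lower (s : String) :
    PySem.Str.lower (PySem.Str.lower s) = PySem.Str.lower s := by
  apply String.toList_inj.mp
  simp [PySem.Str.toList_lower, PySem.Chars.lower, List.map_map, Function.comp_def, pvLowerChar_idem]

theorem pvMapLower_lowered (xs : List Char) :
    (PySem.Chars.lower xs).map PySem.Chars.lowerChar = PySem.Chars.lower xs := by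
  simp [PySem.Chars.lower, List.map_map, Function.comp_def, pvLowerChar_idem]

-- the in-place loop 'for i in range(a, b): xs[i] = f(xs[i])' maps f over the segment [a, b)
theorem pvLoopMap (f : Char → Char) (d : Char) :
    ∀ (n : ℕ) (xs : List Char) (a b : ℕ), a + n = b → b ≤ xs.length →
    (PySem.List.pyRange (a : Int) (b : Int) 1).foldl
        (fun acc i => PySem.List.pySetD acc i (f (PySem.List.pyGetD acc i d))) xs
      = xs.take a ++ ((xs.drop a).take (b - a)).map f ++ xs.drop b := by
  intro n
  induction n with
  | zero =>
      intro xs a b hab hb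
      subst hab
      rw [PySem.List.pyRange_one_eq_nil (by omega)]
      simp
  | succ n ih =>
      intro xs a b hab hb
      have ha : a < xs.length := by omega
      rw [PySem.List.pyRange_one_cons (by exact_mod_cast (by omega : a < b))]
      simp only [List.foldl_cons]
      have hget : PySem.List.pyGetD xs (a : Int) d = xs[a] := by
        rw [PySem.List.pyGetD_natCast, List.getD_eq_getElem xs d ha]
      rw [hget, PySem.List.pySetD_natCast]
      have hcast : ((a : Int) + 1) = ((a + 1 : ℕ) : Int) := by push_cast; ring
      rw [hcast]
      rw [ih (xs.set a (f xs[a])) (a + 1) b (by omega) (by simpa using hb)]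
      have hset : xs.set a (f xs[a]) = xs.take a ++ f xs[a] :: xs.drop (a + 1) := by
        rw [List.set_eq_take_append_cons_drop, if_pos ha]
      have hlt : (xs.take a).length = a := List.length_take_of_le (by omega)
      rw [hset]
      have hdropa : xs.drop a = xs[a] :: xs.drop (a+1) := List.drop_eq_getElem_cons ha
      have e1 : a + 1 - a = 1 := by omega
      have e2 : List.take (a + 1) (xs.take a) = xs.take a := List.take_of_length_le (by rw [hlt]; omega)
      have e3 : List.drop (a + 1) (xs.take a) = [] := List.drop_of_length_le (by rw [hlt]; omega)
      have e4 : List.drop b (xs.take a) = [] := List.drop_of_length_le (by rw [hlt]; omega)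
      have e5 : b - a = (b - (a + 1)) + 1 := by omega
      rw [List.take_append, List.drop_append, List.drop_append, hlt, e1, e2, e3, e4, hdropa, e5]
      simp only [List.append_assoc, List.take_succ_cons, List.drop_succ_cons, List.map_cons,
        List.nil_append, List.map_take, List.map_drop, List.cons_append]
      have e8 : List.drop (b - (a + 1)) (List.drop (a + 1) xs) = List.drop b xs := by
        rw [List.drop_drop]; congr 1; omega
      rw [List.take_zero, List.drop_zero, List.nil_append, e8]

theorem pvLowerLoop_eq (k : List Char) (index : ℕ) (h : index ≤ k.length) :
    pvLowerLoop k index = (k.take index).map PySem.Chars.lowerChar ++ k.drop index := by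
  have := pvLoopMap PySem.Chars.lowerChar ' ' index k 0 index (by omega) h
  unfold pvLowerLoop
  simpa using this

theorem pvUpperLoop_eq (k : List Char) (index : ℕ) (h : index ≤ k.length) :
    pvUpperLoop k index = k.take index ++ (k.drop index).map PySem.Chars.upperChar := by
  have := pvLoopMap PySem.Chars.upperChar ' ' (k.length - index) k index k.length (by omega) le_rfl
  unfold pvUpperLoop
  rw [this]
  have h2 : List.take (k.length - index) (k.drop index) = k.drop index :=
    List.take_of_length_le (by simp)
  simp [h2, List.map_drop]

theorem pvLoops_eq (k : List Char) (index : ℕ) (hk : index < k.length)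
    (hlow : k.map PySem.Chars.lowerChar = k) :
    pvUpperLoop (pvLowerLoop k index) index
      = k.take index ++ PySem.Chars.upper (k.drop index) := by
  have h1 : pvLowerLoop k index = (k.take index).map PySem.Chars.lowerChar ++ k.drop index :=
    pvLowerLoop_eq k index hk.le
  have htk : ((k.take index).map PySem.Chars.lowerChar).length = index := by
    simp [List.length_take]; omega
  have hml : (pvLowerLoop k index).length = k.length := by
    rw [h1, List.length_append, htk]; simp; omega
  have h2 := pvUpperLoop_eq (pvLowerLoop k index) index (by rw [hml]; exact hk.le)
  have htake : (pvLowerLoop k index).take index = (k.take index).map PySem.Chars.lowerChar := by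
    rw [h1, List.take_append, htk]
    rw [List.take_of_length_le (le_of_eq htk), Nat.sub_self, List.take_zero, List.append_nil]
  have hdrop : (pvLowerLoop k index).drop index = k.drop index := by
    rw [h1, List.drop_append, htk]
    rw [List.drop_of_length_le (le_of_eq htk), Nat.sub_self, List.drop_zero, List.nil_append]
  have hfix : (k.take index).map PySem.Chars.lowerChar = k.take index := by
    rw [List.map_take, hlow]
  rw [h2, htake, hdrop, hfix]
  rfl

-- once the flag is set, the rest of the pass uppercases every character
theorem pvAltGo_seen (l : String) :
    ∀ (cs : List Char), pvAltGo l cs true = PySem.Chars.upper cs := by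
  intro cs
  induction cs with
  | nil => rfl
  | cons c rest ih =>
      unfold pvAltGo
      simp only [Bool.true_or, if_true, ih]
      rfl

theorem pvAltGo_nomatch (l : String) (h : ∀ c : Char, String.ofList [c] ≠ l) :
    ∀ (cs : List Char), pvAltGo l cs false = cs := by
  intro cs
  induction cs with
  | nil => rfl
  | cons c rest ih =>
      unfold pvAltGo
      rw [decide_eq_false (h c)]
      simp only [Bool.false_or, if_neg, Bool.false_eq_true, not_false_eq_true, ih]

theorem pvAltGo_single (c0 : Char) :
    ∀ (cs : List Char),
    pvAltGo (String.ofList [c0]) cs false =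
      (match PySem.List.index? cs c0 with
       | none => cs
       | some j => cs.take j ++ PySem.Chars.upper (cs.drop j)) := by
  intro cs
  induction cs with
  | nil =>
      have : PySem.List.index? ([] : List Char) c0 = none := by
        rw [PySem.List.index?_eq_none_iff]; simp
      rw [this]
      rfl
  | cons c rest ih =>
      by_cases hc : c = c0
      · subst hc
        rw [PySem.List.index?_cons_self]
        unfold pvAltGo
        rw [decide_eq_true rfl]
        simp only [Bool.false_or, if_true, pvAltGo_seen]
        simp [PySem.Chars.upper]
      · have hne : String.ofList [c] ≠ String.ofList [c0] := by
          intro h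
          exact hc (by simpa using congrArg String.toList h)
        unfold pvAltGo
        rw [decide_eq_false hne]
        simp only [Bool.false_or, Bool.false_eq_true, ite_false]
        rw [ih, PySem.List.index?_cons_of_ne rest hc]
        cases PySem.List.index? rest c0 with
        | none => rfl
        | some j => simp

theorem pvNotSingle (l : String) (h : ∀ c0 : Char, l.toList ≠ [c0]) (c : Char) :
    String.ofList [c] ≠ l := by
  intro he
  exact h c (by simpa using (congrArg String.toList he).symm)

theorem preLetterCase_spec : Claim_equal_preLetterCase := by
  intro s l _
  unfold Spec_preLetterCase
  simp only [preLetterCase, preLetterCase_alt]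
  have hself : PySem.Str.lower (PySem.Str.lower s) = PySem.Str.lower s := pvLower_lower s
  have hback : String.ofList (PySem.Str.lower s).toList = PySem.Str.lower s :=
    String.ofList_toList
  cases hl : l.toList with
  | nil =>
      have hnm : ∀ c : Char, String.ofList [c] ≠ l :=
        pvNotSingle l (by intro c0 h; rw [hl] at h; cases h)
      rw [pvAltGo_nomatch l hnm]
      exact hself.trans hback.symm
  | cons c rest =>
      cases rest with
      | cons c' rest' =>
          have hnm : ∀ cc : Char, String.ofList [cc] ≠ l :=
            pvNotSingle l (by intro c0 h; rw [hl] at h; cases h)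
          rw [pvAltGo_nomatch l hnm]
          exact hself.trans hback.symm
      | nil =>
          have hlc : l = String.ofList [c] := String.toList_inj.mp (by simpa using hl)
          rcases Option.eq_none_or_eq_some (PySem.List.index? (PySem.Str.lower s).toList c)
            with hidx | ⟨index, hidx⟩
          · simp only [hlc, pvAltGo_single, hidx]
            exact hself.trans hback.symm
          · obtain ⟨hk, -, -⟩ := PySem.List.getElem_of_index?_eq_some hidx
            have hlow : ((PySem.Str.lower s).toList).map PySem.Chars.lowerChar
                = (PySem.Str.lower s).toList := by
              rw [PySem.Str.toList_lower]
              exact pvMapLower_lowered s.toList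
            simp only [hlc, pvAltGo_single, hidx]
            exact congrArg String.ofList (pvLoops_eq _ index hk hlow)
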